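-- pv_equiv track=rewrite | github.com/Asutosh11/TextSummarizeX | backend/api.py | makeParagraph
-- ===== SOURCE A (Python) =====
-- def makeParagraph(full_stops_in_one_para, input_string):
--     number_of_fullstops = 0
--     a = ''
--     for i in input_string:
--         if i=='.':
--             number_of_fullstops = number_of_fullstops + 1
--             a = a+i
--             if(number_of_fullstops == full_stops_in_one_para):
--                 a = a + ' \n\n'
--                 number_of_fullstops = 0
--         else:
--             a+=i
--     return(a)
-- ===== SOURCE B (Python) =====
-- def makeParagraph(full_stops_in_one_para, input_string):
--     parts = input_string.split('.')
--     res = ''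
--     for k, part in enumerate(parts):
--         res += part
--         if k < len(parts) - 1:
--             res += '.'
--             if full_stops_in_one_para >= 1 and (k + 1) % full_stops_in_one_para == 0:
--                 res += ' \n\n'
--     return res
-- ===== Notes on version B (the rewrite author's own statement) =====
-- stated objective: faster
-- what changed: Replaces the character-by-character scan with a running fullstop counter by a single split('.') pass over dot-delimited tokens, deciding each paragraph break by the token index modulo N instead of maintaining and resetting a counter.
import Mathlib
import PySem

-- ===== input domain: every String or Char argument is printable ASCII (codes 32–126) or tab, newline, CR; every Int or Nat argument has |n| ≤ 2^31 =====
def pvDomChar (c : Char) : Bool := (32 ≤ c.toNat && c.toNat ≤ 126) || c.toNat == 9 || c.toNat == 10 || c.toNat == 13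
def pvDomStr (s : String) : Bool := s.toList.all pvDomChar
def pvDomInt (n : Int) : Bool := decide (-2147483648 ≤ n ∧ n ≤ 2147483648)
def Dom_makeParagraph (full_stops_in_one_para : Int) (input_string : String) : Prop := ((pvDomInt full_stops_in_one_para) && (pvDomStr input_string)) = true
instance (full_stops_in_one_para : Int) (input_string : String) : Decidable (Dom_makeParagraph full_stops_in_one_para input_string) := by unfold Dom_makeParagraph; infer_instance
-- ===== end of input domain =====

-- B replaces A's character scan with a counter by a split('.') pass over tokens,
-- deciding each break by the token index modulo N (objective: alternative decomposition).

-- ===== PORT A =====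
-- literal transliteration of A: scan the characters, counting fullstops, resetting at N
def makeParagraph (full_stops_in_one_para : Int) (input_string : String) : String :=
  (input_string.toList.foldl
    (fun (st : Int × String) (i : Char) =>
      let number_of_fullstops := st.1
      let a := st.2
      if i = '.' then
        let number_of_fullstops := number_of_fullstops + 1
        let a := a.push i
        if number_of_fullstops = full_stops_in_one_para then
          (0, a ++ " \n\n")
        else
          (number_of_fullstops, a)
      else
        (number_of_fullstops, a.push i))
    (0, "")).2

-- ===== PORT B =====
-- literal transliteration of B (Source B): split on '.', loop over enumerated tokens
def makeParagraph_alt (full_stops_in_one_para : Int) (input_string : String) : String :=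
  let parts := PySem.Chars.splitOn input_string.toList ['.']
  String.ofList
    ((PySem.List.enumerate parts 0).foldl
      (fun (res : List Char) (kp : Int × List Char) =>
        let res := res ++ kp.2
        if kp.1 < (parts.length : Int) - 1 then
          let res := res ++ ['.']
          if 1 ≤ full_stops_in_one_para ∧
              PySem.Int.mod (kp.1 + 1) full_stops_in_one_para = 0 then
            res ++ (" \n\n").toList
          else
            res
        else
          res)
      [])

-- ===== PRECONDITION & SPEC =====
def Spec_makeParagraph (full_stops_in_one_para : Int) (input_string : String) (out : String) : Prop := out = makeParagraph_alt full_stops_in_one_para input_string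
instance (full_stops_in_one_para : Int) (input_string : String) (out : String) : Decidable (Spec_makeParagraph full_stops_in_one_para input_string out) := by unfold Spec_makeParagraph; infer_instance

-- ===== CLAIM (what is proved, stated in full; the proofs are below) =====
def Claim_equal_makeParagraph : Prop := ∀ (full_stops_in_one_para : Int) (input_string : String), Dom_makeParagraph full_stops_in_one_para input_string → Spec_makeParagraph full_stops_in_one_para input_string (makeParagraph full_stops_in_one_para input_string)

-- ===== LEMMAS AND PROOFS =====

-- A's step on a list-of-chars accumulator (same computation, String replaced by List Char)
def stepA (N : Int) (st : Int × List Char) (i : Char) : Int × List Char :=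
  if i = '.' then
    let n := st.1 + 1
    let a := st.2 ++ [i]
    if n = N then (0, a ++ (" \n\n").toList) else (n, a)
  else (st.1, st.2 ++ [i])

-- reference split on '.'
def splitDot : List Char → List (List Char)
  | [] => [[]]
  | c :: t => if c = '.' then [] :: splitDot t else (splitDot t).modifyHead (c :: ·)

-- glue pieces back with '.'
def glueDot : List (List Char) → List Char
  | [] => []
  | [p] => p
  | p :: q :: r => p ++ '.' :: glueDot (q :: r)

theorem splitDot_ne_nil (l : List Char) : splitDot l ≠ [] := by
  induction l with
  | nil => simp [splitDot]
  | cons c t ih =>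
    simp only [splitDot]
    split
    · simp
    · cases h : splitDot t with
      | nil => exact absurd h ih
      | cons p ps => simp

theorem go_eq (fuel : Nat) (l cur : List Char) (acc : List (List Char))
    (h : l.length < fuel) :
    PySem.Chars.splitOn.go ['.'] fuel l cur acc
      = acc.reverse ++ (splitDot l).modifyHead (cur.reverse ++ ·) := by
  induction fuel generalizing l cur acc with
  | zero => omega
  | succ fuel ih =>
    cases l with
    | nil => simp [PySem.Chars.splitOn.go, splitDot]
    | cons c rest =>
      have hrest : rest.length < fuel := by simpa using Nat.lt_of_succ_lt_succ h
      by_cases hc : c = '.'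
      · subst hc
        have hpre : (['.'] : List Char).isPrefixOf ('.' :: rest) = true := by
          simp [List.isPrefixOf]
        simp only [PySem.Chars.splitOn.go, hpre, if_pos, List.length_cons,
          List.length_nil, List.drop_succ_cons, List.drop_zero]
        rw [ih _ _ _ hrest]
        cases hs : splitDot rest with
        | nil => exact absurd hs (splitDot_ne_nil rest)
        | cons p ps => simp [splitDot, hs]
      · have hpre : (['.'] : List Char).isPrefixOf (c :: rest) = false := by
          simp [List.isPrefixOf, Ne.symm hc]
        simp only [PySem.Chars.splitOn.go, hpre]
        rw [ih _ _ _ hrest]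
        simp only [splitDot, if_neg hc]
        cases hs : splitDot rest with
        | nil => exact absurd hs (splitDot_ne_nil rest)
        | cons p ps => simp

theorem splitOn_eq_splitDot (l : List Char) :
    PySem.Chars.splitOn l ['.'] = splitDot l := by
  unfold PySem.Chars.splitOn
  rw [go_eq _ _ _ _ (by omega)]
  cases hs : splitDot l with
  | nil => exact absurd hs (splitDot_ne_nil l)
  | cons p ps => simp

theorem glueDot_splitDot (l : List Char) : glueDot (splitDot l) = l := by
  induction l with
  | nil => simp [splitDot, glueDot]
  | cons c t ih =>
    simp only [splitDot]
    by_cases hc : c = '.'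
    · subst hc
      rw [if_pos rfl]
      cases hs : splitDot t with
      | nil => exact absurd hs (splitDot_ne_nil t)
      | cons p ps => rw [hs] at ih; simpa [glueDot] using ih
    · simp only [if_neg hc]
      cases hs : splitDot t with
      | nil => exact absurd hs (splitDot_ne_nil t)
      | cons p ps =>
        rw [hs] at ih
        cases ps with
        | nil => simpa [glueDot] using congrArg (c :: ·) ih
        | cons q r => simpa [glueDot] using congrArg (c :: ·) ih

theorem splitDot_dotFree (l : List Char) : ∀ p ∈ splitDot l, '.' ∉ p := by
  induction l with
  | nil => simp [splitDot]
  | cons c t ih =>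
    simp only [splitDot]
    by_cases hc : c = '.'
    · subst hc; simpa using ih
    · simp only [if_neg hc]
      cases hs : splitDot t with
      | nil => exact absurd hs (splitDot_ne_nil t)
      | cons p ps =>
        rw [hs] at ih
        intro q hq
        simp only [List.modifyHead, List.mem_cons] at hq
        rcases hq with h | h
        · subst h
          intro hm
          rcases List.mem_cons.mp hm with h' | h'
          · exact hc h'.symm
          · exact ih p (by simp) h'
        · exact ih q (by simp [h])

theorem foldl_stepA_dotFree (N : Int) (p : List Char) (hp : '.' ∉ p) :
    ∀ (n : Int) (acc : List Char),
      p.foldl (stepA N) (n, acc) = (n, acc ++ p) := by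
  induction p with
  | nil => simp
  | cons c t ih =>
    intro n acc
    have hc : c ≠ '.' := fun h => hp (by simp [h])
    have ht : '.' ∉ t := fun h => hp (by simp [h])
    simp only [List.foldl_cons, stepA, if_neg (by simpa using hc)]
    rw [ih ht]
    simp

theorem mod_step (N k : Int) (hN : 1 ≤ N) (_hk : 0 ≤ k) :
    ((k % N + 1 = N) ↔ (k + 1) % N = 0)
      ∧ (k % N + 1 ≠ N → (k + 1) % N = k % N + 1) := by
  have h0 : 0 ≤ k % N := Int.emod_nonneg k (by omega)
  have h1 : k % N < N := Int.emod_lt_of_pos k (by omega)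
  have hstep : (k + 1) % N = (k % N + 1) % N := by
    have hd : k + 1 = k % N + 1 + N * (k / N) := by rw [Int.emod_def]; ring
    rw [hd, Int.add_mul_emod_self_left]
  constructor
  · constructor
    · intro h
      rw [hstep, h]
      simp
    · intro h
      by_contra hne
      have hlt : k % N + 1 < N := by omega
      rw [hstep, Int.emod_eq_of_lt (by omega) hlt] at h
      omega
  · intro hne
    have hlt : k % N + 1 < N := by omega
    rw [hstep, Int.emod_eq_of_lt (by omega) hlt]

-- the invariant value of A's counter after k fullstops have been emitted
def inv (N k : Int) : Int := if 1 ≤ N then k % N else k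

-- B's loop body, abstracted over the total number of parts T
def stepB (N T : Int) (res : List Char) (kp : Int × List Char) : List Char :=
  let res := res ++ kp.2
  if kp.1 < T - 1 then
    let res := res ++ ['.']
    if 1 ≤ N ∧ PySem.Int.mod (kp.1 + 1) N = 0 then res ++ (" \n\n").toList else res
  else res

theorem main_lemma (N : Int) (ps : List (List Char)) (hne : ps ≠ [])
    (hdf : ∀ p ∈ ps, '.' ∉ p) (T k : Int) (acc : List Char)
    (hk : 0 ≤ k) (hT : k + ps.length = T) :
    ((glueDot ps).foldl (stepA N) (inv N k, acc)).2
      = (PySem.List.enumerate ps k).foldl (stepB N T) acc := by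
  induction ps generalizing k acc with
  | nil => exact absurd rfl hne
  | cons p ps ih =>
    cases ps with
    | nil =>
      -- last piece: no '.' appended, k = T - 1
      have hp : '.' ∉ p := hdf p (by simp)
      simp only [glueDot, PySem.List.enumerate_cons, PySem.List.enumerate_nil]
      rw [foldl_stepA_dotFree N p hp]
      have hkT : ¬ (k < T - 1) := by simp at hT; omega
      simp [stepB, hkT]
    | cons q r =>
      have hp : '.' ∉ p := hdf p (by simp)
      have hkT : k < T - 1 := by
        simp only [List.length_cons] at hT
        push_cast at hT
        omega
      simp only [glueDot, PySem.List.enumerate_cons]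
      rw [List.foldl_append, foldl_stepA_dotFree N p hp, List.foldl_cons]
      -- A's '.' step
      have hdot : stepA N (inv N k, acc ++ p) '.'
          = (inv N (k + 1),
             (stepB N T acc (k, p))) := by
        simp only [stepA, stepB, if_pos hkT]
        by_cases hN : 1 ≤ N
        · have hm := mod_step N k hN hk
          have hmod : PySem.Int.mod (k + 1) N = (k + 1) % N := by
            simp [PySem.Int.mod, Int.fmod_eq_emod_of_nonneg _ (by omega : (0:Int) ≤ N)]
          by_cases hfire : k % N + 1 = N
          · have h0 : (k + 1) % N = 0 := (hm.1).mp hfire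
            simp [inv, hN, hmod, hfire, h0]
          · have hnz : (k + 1) % N = k % N + 1 := (hm.2) hfire
            have hne0 : ¬ ((k + 1) % N = 0) := by
              have h0 : 0 ≤ k % N := Int.emod_nonneg k (by omega)
              omega
            have h1 : ¬ (k % N + 1 = 0) := by
              have := Int.emod_nonneg k (show N ≠ 0 by omega)
              omega
            simp [inv, hN, hmod, hfire, hnz, h1]
        · have hfire : ¬ (k + 1 = N) := by omega
          simp [inv, hN, hfire]
      rw [hdot]
      exact ih (by simp) (fun x hx => hdf x (by simp [hx])) (k + 1)
        (stepB N T acc (k, p)) (by omega)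
        (by simp only [List.length_cons] at hT ⊢; push_cast at hT ⊢; omega)

-- bridge: A's String-state fold equals the List-Char fold stepA
theorem fold_str_eq (N : Int) (l : List Char) :
    ∀ (n : Int) (a : String),
      l.foldl
        (fun (st : Int × String) (i : Char) =>
          let number_of_fullstops := st.1
          let a := st.2
          if i = '.' then
            let number_of_fullstops := number_of_fullstops + 1
            let a := a.push i
            if number_of_fullstops = N then (0, a ++ " \n\n")
            else (number_of_fullstops, a)
          else (number_of_fullstops, a.push i)) (n, a)
      = (fun pr => (pr.1, String.ofList pr.2)) (l.foldl (stepA N) (n, a.toList)) := by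
  induction l with
  | nil => intro n a; simp
  | cons c t ih =>
    intro n a
    simp only [List.foldl_cons, stepA]
    by_cases hc : c = '.'
    · subst hc
      by_cases hfire : n + 1 = N
      · simp only [if_pos hfire]
        rw [ih]
        congr 1
        simp
      · simp only [if_neg hfire]
        rw [ih]
        congr 1
        simp
    · simp only [if_neg hc]
      rw [ih]
      congr 1
      simp

-- ===== VERDICT (by name: the statement is the Claim_ definition above) =====
theorem makeParagraph_spec : Claim_equal_makeParagraph := by
  intro N s _
  unfold Spec_makeParagraph makeParagraph makeParagraph_alt
  rw [fold_str_eq]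
  rw [splitOn_eq_splitDot]
  have h := main_lemma N (splitDot s.toList) (splitDot_ne_nil _)
    (splitDot_dotFree _) ((splitDot s.toList).length : Int) 0 [] (by omega)
    (by simp)
  rw [glueDot_splitDot] at h
  have hinv : inv N 0 = 0 := by simp [inv]
  rw [hinv] at h
  show String.ofList (List.foldl (stepA N) (0, "".toList) s.toList).2 = _
  have he : ("" : String).toList = [] := rfl
  rw [he, h]
  rfl
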